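-- pv_equiv track=rewrite | github.com/AmineBenzaazaa/Recipe-Pipeline | pin_extract.py | is_valid_hostname
-- ===== SOURCE A (Python) =====
-- def is_valid_hostname(hostname):
--     if not hostname:
--         return False
--     trimmed = hostname[:-1] if hostname.endswith(".") else hostname
--     if not trimmed:
--         return False
--     if len(trimmed) > 253:
--         return False
--     for label in trimmed.split("."):
--         if not label or len(label) > 63:
--             return False
--         for ch in label:
--             codepoint = ord(ch)
--             if codepoint <= 32 or codepoint == 127:
--                 return False
--     return True
-- ===== SOURCE B (Python) =====
-- def is_valid_hostname(hostname):
--     # Single-pass state machine: walk the trimmed string once, tracking the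
--     # length of the current label in `run`; no splitting, no nested loops.
--     if not hostname:
--         return False
--     trimmed = hostname[:-1] if hostname.endswith(".") else hostname
--     if not trimmed or len(trimmed) > 253:
--         return False
--     run = 0
--     for ch in trimmed:
--         if ch == ".":
--             if run == 0 or run > 63:
--                 return False
--             run = 0
--         elif ord(ch) <= 32 or ord(ch) == 127:
--             return False
--         else:
--             run += 1
--     return 0 < run <= 63
-- ===== Notes on version B (the rewrite author's own statement) =====
-- stated objective: alternative
-- what changed: Replaces the dot-split plus nested per-label/per-character loops with a single-pass state machine over the trimmed string that tracks the current label length in an accumulator and validates separators, control characters and label lengths on the fly.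
import Mathlib
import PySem

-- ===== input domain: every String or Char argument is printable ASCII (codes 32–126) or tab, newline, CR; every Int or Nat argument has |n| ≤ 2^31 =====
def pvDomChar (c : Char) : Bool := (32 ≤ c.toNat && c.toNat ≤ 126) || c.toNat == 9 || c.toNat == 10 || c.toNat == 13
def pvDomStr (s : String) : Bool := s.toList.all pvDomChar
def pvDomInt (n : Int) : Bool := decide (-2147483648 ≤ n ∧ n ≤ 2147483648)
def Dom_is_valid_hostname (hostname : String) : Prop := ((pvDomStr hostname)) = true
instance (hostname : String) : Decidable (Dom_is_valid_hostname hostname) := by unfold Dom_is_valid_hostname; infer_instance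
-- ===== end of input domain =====

-- B replaces A's split('.') plus nested per-label/per-character loops by a single-pass
-- state machine over the trimmed string with a current-label-length accumulator;
-- objective: alternative algorithm, same asymptotic cost.

-- ===== PORT A =====
-- inner 'for ch in label' loop of A (early return False on a control character)
def pvA_charLoop : List Char → Bool
  | [] => true
  | ch :: rest => if ch.toNat ≤ 32 ∨ ch.toNat = 127 then false else pvA_charLoop rest

-- outer 'for label in trimmed.split(".")' loop of A
def pvA_labelLoop : List (List Char) → Bool
  | [] => true
  | label :: rest =>
      if label.isEmpty ∨ label.length > 63 then false
      else if pvA_charLoop label = false then false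
      else pvA_labelLoop rest

-- A's body after the initial 'if not hostname' guard, as a function of 'trimmed'
def pvA_body (trimmed : List Char) : Bool :=
  if trimmed.isEmpty then false
  else if trimmed.length > 253 then false
  else pvA_labelLoop (PySem.Chars.splitOn trimmed ['.'])

def is_valid_hostname (hostname : String) : Bool :=
  if hostname.toList.isEmpty then false
  else
    pvA_body (if PySem.Chars.endswith hostname.toList ['.']
              then PySem.Chars.slice hostname.toList none (some (-1))
              else hostname.toList)

-- ===== PORT B =====
-- B's single 'for ch in trimmed' loop: run = length of the current label so far;
-- at the end of the string, the last label must be non-empty and ≤ 63 chars.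
def pvB_loop : List Char → Nat → Bool
  | [], run => decide (0 < run ∧ run ≤ 63)
  | ch :: rest, run =>
      if ch = '.' then
        if run = 0 ∨ run > 63 then false else pvB_loop rest 0
      else if ch.toNat ≤ 32 ∨ ch.toNat = 127 then false
      else pvB_loop rest (run + 1)

-- B's body after the initial 'if not hostname' guard
def pvB_body (trimmed : List Char) : Bool :=
  if trimmed.isEmpty ∨ trimmed.length > 253 then false
  else pvB_loop trimmed 0

def is_valid_hostname_alt (hostname : String) : Bool :=
  if hostname.toList.isEmpty then false
  else
    pvB_body (if PySem.Chars.endswith hostname.toList ['.']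
              then PySem.Chars.slice hostname.toList none (some (-1))
              else hostname.toList)

-- ===== PRECONDITION & SPEC =====
def Spec_is_valid_hostname (hostname : String) (out : Bool) : Prop := out = is_valid_hostname_alt hostname
instance (hostname : String) (out : Bool) : Decidable (Spec_is_valid_hostname hostname out) := by unfold Spec_is_valid_hostname; infer_instance

-- ===== CLAIM (what is proved, stated in full; the proofs are below) =====
def Claim_equal_is_valid_hostname : Prop := ∀ (hostname : String), Dom_is_valid_hostname hostname → Spec_is_valid_hostname hostname (is_valid_hostname hostname)

-- ===== LEMMAS AND PROOFS =====

-- the "bad character" predicate both programs test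
def pvBad (ch : Char) : Bool := decide (ch.toNat ≤ 32 ∨ ch.toNat = 127)

-- reference single-separator split, structural on the string
def pvSplit (c : Char) : List Char → List (List Char)
  | [] => [[]]
  | a :: rest => if a == c then [] :: pvSplit c rest else (pvSplit c rest).modifyHead (a :: ·)

lemma pvSplit_ne_nil (c : Char) (l : List Char) : pvSplit c l ≠ [] := by
  induction l with
  | nil => simp [pvSplit]
  | cons a rest ih =>
    simp only [pvSplit]
    split
    · simp
    · cases h : pvSplit c rest with
      | nil => exact absurd h ih
      | cons x xs => simp

lemma pvGo_eq (c : Char) (fuel : Nat) : ∀ (l cur : List Char) (acc : List (List Char)),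
    l.length ≤ fuel →
    PySem.Chars.splitOn.go [c] fuel l cur acc
      = acc.reverse ++ (pvSplit c l).modifyHead (cur.reverse ++ ·) := by
  induction fuel with
  | zero =>
    intro l cur acc h
    have hl : l = [] := by cases l <;> simp_all
    subst hl
    simp [PySem.Chars.splitOn.go, pvSplit]
  | succ fuel ih =>
    intro l cur acc h
    cases l with
    | nil => simp [PySem.Chars.splitOn.go, pvSplit]
    | cons a rest =>
      rw [PySem.Chars.splitOn.go]
      by_cases hc : a = c
      · subst hc
        have hp : [a].isPrefixOf (a :: rest) = true := by simp [List.isPrefixOf]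
        rw [if_pos hp]
        rw [ih _ _ _ (by simpa using h)]
        cases hs : pvSplit a rest with
        | nil => exact absurd hs (pvSplit_ne_nil a rest)
        | cons x xs => simp [pvSplit, hs]
      · have hp : [c].isPrefixOf (a :: rest) = false := by
          simp [List.isPrefixOf]
          exact fun h' => absurd h'.symm hc
        rw [if_neg (by simp [hp])]
        rw [ih _ _ _ (by simpa using Nat.le_of_succ_le_succ (by simpa using h))]
        cases hs : pvSplit c rest with
        | nil => exact absurd hs (pvSplit_ne_nil c rest)
        | cons x xs =>
          simp [pvSplit, hs, beq_iff_eq, hc]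

lemma pvSplitOn_eq (c : Char) (s : List Char) :
    PySem.Chars.splitOn s [c] = pvSplit c s := by
  rw [PySem.Chars.splitOn]
  rw [pvGo_eq c _ s [] [] (by omega)]
  cases h : pvSplit c s with
  | nil => exact absurd h (pvSplit_ne_nil c s)
  | cons x xs => simp

-- label validity as A checks it, with `run` chars of the label already consumed
def pvOk (run : Nat) (x : List Char) : Bool :=
  decide (0 < run + x.length ∧ run + x.length ≤ 63) && !(x.any pvBad)

-- reference check over a non-empty list of labels, first label partially consumed
def pvRef : Nat → List (List Char) → Bool
  | _, [] => true
  | run, [x] => pvOk run x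
  | run, x :: y :: ys => pvOk run x && pvRef 0 (y :: ys)

lemma pvCharLoop_eq (l : List Char) : pvA_charLoop l = !(l.any pvBad) := by
  induction l with
  | nil => simp [pvA_charLoop]
  | cons ch rest ih =>
    simp only [pvA_charLoop, List.any_cons, pvBad]
    by_cases h : ch.toNat ≤ 32 ∨ ch.toNat = 127
    · simp [h]
    · simp [h, ih]

lemma pvLabelLoop_eq (L : List (List Char)) :
    pvA_labelLoop L = pvRef 0 L := by
  induction L with
  | nil => simp [pvA_labelLoop, pvRef]
  | cons label rest ih =>
    have hhead : (if label.isEmpty ∨ label.length > 63 then false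
        else if pvA_charLoop label = false then false else true) = pvOk 0 label := by
      rw [pvCharLoop_eq]
      unfold pvOk
      by_cases h1 : label.isEmpty ∨ label.length > 63
      · rw [if_pos h1]
        rcases h1 with h | h
        · simp [List.isEmpty_iff.mp h]
        · simp [Nat.not_le.mpr h]
      · rw [if_neg h1]
        push Not at h1
        obtain ⟨he, hl⟩ := h1
        have hlen : 0 < label.length := List.length_pos_iff.mpr (by simpa [List.isEmpty_iff] using he)
        by_cases hb : label.any pvBad
        · simp [hb]
        · simp only [Bool.not_eq_true] at hb
          simp [hb, hlen, hl]
    have hA : pvA_labelLoop (label :: rest) = (pvOk 0 label && pvA_labelLoop rest) := by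
      simp only [pvA_labelLoop]
      rw [← hhead]
      split_ifs <;> simp
    rw [hA, ih]
    cases rest with
    | nil => simp [pvRef]
    | cons y ys => rfl

lemma pvLoop_eq_ref (l : List Char) : ∀ run, pvB_loop l run = pvRef run (pvSplit '.' l) := by
  induction l with
  | nil => intro run; simp [pvB_loop, pvSplit, pvRef, pvOk]
  | cons ch rest ih =>
    intro run
    simp only [pvB_loop, pvSplit]
    by_cases hc : ch = '.'
    · subst hc
      have hbt : (('.' : Char) == '.') = true := by simp
      rw [if_pos rfl]
      rw [if_pos hbt]
      cases hs : pvSplit '.' rest with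
      | nil => exact absurd hs (pvSplit_ne_nil _ _)
      | cons x xs =>
        have : pvRef run ([] :: x :: xs) = (pvOk run [] && pvRef 0 (x :: xs)) := rfl
        rw [this, ← hs, ← ih 0]
        unfold pvOk
        by_cases hr : run = 0 ∨ run > 63
        · rw [if_pos hr]
          rcases hr with h | h
          · simp [h]
          · simp [Nat.not_le.mpr (by simpa using h)]
        · rw [if_neg hr]
          push Not at hr
          obtain ⟨h0, h63⟩ := hr
          have hp : 0 < run := Nat.pos_of_ne_zero h0
          have hle : run ≤ 63 := by omega
          simp [hp, hle]
    · have hbf : ¬ ((ch == '.') = true) := by simp [hc]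
      rw [if_neg hc]
      rw [if_neg hbf]
      cases hs : pvSplit '.' rest with
      | nil => exact absurd hs (pvSplit_ne_nil _ _)
      | cons x xs =>
        by_cases hb : ch.toNat ≤ 32 ∨ ch.toNat = 127
        · rw [if_pos hb]
          have hbad : pvBad ch = true := by simp [pvBad, hb]
          cases xs with
          | nil => simp [pvRef, pvOk, hbad]
          | cons y ys => simp [pvRef, pvOk, hbad]
        · rw [if_neg hb]
          have hgood : pvBad ch = false := by simp [pvBad]; push Not at hb; exact hb
          have hok : ∀ r, pvOk r (ch :: x) = pvOk (r + 1) x := by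
            intro r
            have hlen : r + (x.length + 1) = r + 1 + x.length := by omega
            simp [pvOk, List.any_cons, hgood, hlen]
          rw [ih (run + 1), hs]
          cases xs with
          | nil => simp [pvRef, hok]
          | cons y ys => simp [pvRef, hok]

lemma pvBody_eq (t : List Char) : pvA_body t = pvB_body t := by
  unfold pvA_body pvB_body
  by_cases h1 : t.isEmpty
  · simp [h1]
  · by_cases h2 : t.length > 253
    · simp [h1, h2]
    · rw [if_neg h1, if_neg h2, if_neg (by simp [h1, h2])]
      rw [pvSplitOn_eq, pvLabelLoop_eq, pvLoop_eq_ref]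

-- ===== VERDICT (by name: the statement is the Claim_ definition above) =====
theorem is_valid_hostname_spec : Claim_equal_is_valid_hostname := by
  intro hostname _
  unfold Spec_is_valid_hostname is_valid_hostname is_valid_hostname_alt
  by_cases h : hostname.toList.isEmpty
  · simp [h]
  · simp only [h, if_false, Bool.false_eq_true]
    exact pvBody_eq _
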